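-- pv_equiv track=rewrite | github.com/Jerempire/gym-anything | benchmarks/cua_world/environments/talon_env/tasks/build_vscode_voice_module/verifier.py | _count_command_lines
-- ===== SOURCE A (Python) =====
-- def _count_command_lines(talon_text):
--     """Count lines that look like voice command definitions (contain ': ' pattern)."""
--     lines = talon_text.splitlines()
--     in_body = False
--     command_count = 0
--     for line in lines:
--         stripped = line.strip()
--         if stripped == '-':
--             in_body = True
--             continue
--         if not in_body:
--             continue
--         # A command line: text followed by ': ' and an action, at top indent level
--         # Skip lines that are continuations (indented) or blank or comment
--         if stripped.startswith('#') or not stripped: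
--             continue
--         # Top-level command: not indented (or lightly indented as trigger phrase)
--         # Pattern: "phrase: action" OR "phrase:" (multi-line)
--         if not line.startswith(' ') and not line.startswith('\t') and ':' in stripped:
--             command_count += 1
--     return command_count
-- ===== SOURCE B (Python) =====
-- def _count_command_lines(talon_text):
--     """Count lines that look like voice command definitions (contain ': ' pattern)."""
--     count = 0   # command-like lines in the suffix processed so far
--     result = 0
--     for line in reversed(talon_text.splitlines()):
--         stripped = line.strip()
--         if stripped == '-':
--             # a divider: everything after it (already counted) is body;
--             # the leftmost divider is processed last, so it wins
--             result = count
--         elif (stripped and not stripped.startswith('#')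
--               and not line.startswith((' ', '\t')) and ':' in stripped):
--             count += 1
--     return result
-- ===== Notes on version B (the rewrite author's own statement) =====
-- stated objective: alternative
-- what changed: Replaces A's forward loop with an in_body flag by a single backward traversal that maintains a running count of command-like lines in the suffix and overwrites the result with that count at each divider line (leftmost divider processed last wins); no flag and no divider search.
import Mathlib
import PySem

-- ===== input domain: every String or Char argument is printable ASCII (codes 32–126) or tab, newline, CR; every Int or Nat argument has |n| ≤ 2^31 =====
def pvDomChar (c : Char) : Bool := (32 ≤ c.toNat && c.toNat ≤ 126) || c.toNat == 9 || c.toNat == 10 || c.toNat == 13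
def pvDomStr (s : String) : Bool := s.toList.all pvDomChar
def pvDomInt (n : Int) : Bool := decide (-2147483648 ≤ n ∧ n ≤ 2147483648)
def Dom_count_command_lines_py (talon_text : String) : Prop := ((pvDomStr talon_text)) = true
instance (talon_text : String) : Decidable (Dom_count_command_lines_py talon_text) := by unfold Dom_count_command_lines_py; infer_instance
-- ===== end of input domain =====

-- B replaces A's forward loop with an in_body flag by a backward traversal keeping a
-- running count of command-like suffix lines, overwritten into the result at each
-- divider line (objective: alternative).

-- ===== PORT A =====
-- the body of A's for-loop, carrying (in_body, command_count)
def pvStepA (st : Bool × Int) (line : String) : Bool × Int :=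
  let stripped := PySem.Str.strip line
  if stripped == "-" then (true, st.2)
  else if !st.1 then st
  else if PySem.Str.startswith stripped "#" || stripped == "" then st
  else if !(PySem.Str.startswith line " ") && !(PySem.Str.startswith line "\t")
          && PySem.Str.isIn ":" stripped then (st.1, st.2 + 1)
  else st

def count_command_lines_py (talon_text : String) : Int :=
  let lines := PySem.Str.splitlines talon_text
  (lines.foldl pvStepA (false, 0)).2

-- ===== PORT B =====
-- B's elif condition on a line (its stripped value recomputed as in Source B)
def pvAltPred (line : String) : Bool :=
  let stripped := PySem.Str.strip line
  stripped != "" && !PySem.Str.startswith stripped "#"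
    && !(PySem.Str.startswith line " " || PySem.Str.startswith line "\t")
    && PySem.Str.isIn ":" stripped

-- the body of B's reversed for-loop, carrying (count, result)
def pvStepB (st : Int × Int) (line : String) : Int × Int :=
  if PySem.Str.strip line == "-" then (st.1, st.1)
  else if pvAltPred line then (st.1 + 1, st.2)
  else st

def count_command_lines_py_alt (talon_text : String) : Int :=
  (((PySem.Str.splitlines talon_text).reverse).foldl pvStepB (0, 0)).2

-- ===== PRECONDITION & SPEC =====
def Spec_count_command_lines_py (talon_text : String) (out : Int) : Prop := out = count_command_lines_py_alt talon_text
instance (talon_text : String) (out : Int) : Decidable (Spec_count_command_lines_py talon_text out) := by unfold Spec_count_command_lines_py; infer_instance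

-- ===== CLAIM (what is proved, stated in full; the proofs are below) =====
def Claim_equal_count_command_lines_py : Prop := ∀ (talon_text : String), Dom_count_command_lines_py talon_text → Spec_count_command_lines_py talon_text (count_command_lines_py talon_text)

-- ===== LEMMAS AND PROOFS =====

-- the common reference value: command-like lines strictly after the first divider
def pvR (ls : List String) : Int :=
  match ls.findIdx? (fun l => PySem.Str.strip l == "-") with
  | none => 0
  | some i => (((ls.drop (i + 1)).countP pvAltPred : Nat) : Int)

-- a divider line never satisfies B's predicate (':' is not in "-")
theorem pvPred_divider (l : String) (h : PySem.Str.strip l = "-") : pvAltPred l = false := by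
  unfold pvAltPred
  have h2 : PySem.Chars.strip l.toList = ['-'] := by
    have := congrArg String.toList h
    simpa using this
  have hne : PySem.Chars.isIn [':'] (PySem.Chars.strip l.toList) = false := by
    rw [h2]; decide
  simp_all [PySem.Str.isIn, PySem.Str.strip]

-- with the flag set, A's step increments exactly when B's predicate holds
theorem pvStepA_true (c : Int) (line : String) :
    pvStepA (true, c) line = (true, c + if pvAltPred line then 1 else 0) := by
  unfold pvStepA pvAltPred
  by_cases hd : PySem.Str.strip line = "-"
  · have := pvPred_divider line hd
    unfold pvAltPred at this
    simp_all
  · by_cases h0 : PySem.Str.strip line = ""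
    · simp_all
    · by_cases hh : PySem.Str.startswith (PySem.Str.strip line) "#"
      · simp_all
      · by_cases hs : PySem.Str.startswith line " "
        · simp_all
        · by_cases ht : PySem.Str.startswith line "\t"
          · simp_all
          · by_cases hc : PySem.Str.isIn ":" (PySem.Str.strip line)
            · simp_all
            · simp_all

-- once in the body, A's fold counts the lines satisfying B's predicate
theorem pvFold_true (ls : List String) : ∀ (c : Int),
    (ls.foldl pvStepA (true, c)).2 = c + ((ls.countP pvAltPred : Nat) : Int) := by
  induction ls with
  | nil => intro c; simp
  | cons l ls ih =>
    intro c
    rw [List.foldl_cons, pvStepA_true, ih, List.countP_cons]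
    by_cases h : pvAltPred l
    · simp [h]; ring
    · simp [h]

-- A's whole fold computes the reference value pvR
theorem pvFold_A (ls : List String) :
    (ls.foldl pvStepA (false, 0)).2 = pvR ls := by
  induction ls with
  | nil => simp [pvR]
  | cons l ls ih =>
    by_cases hd : PySem.Str.strip l = "-"
    · have hstep : pvStepA (false, 0) l = (true, 0) := by
        unfold pvStepA; simp [hd]
      rw [List.foldl_cons, hstep]
      unfold pvR
      rw [List.findIdx?_cons]
      simp only [hd, beq_self_eq_true, if_true, pvFold_true]
      simp
    · have hstep : pvStepA (false, 0) l = (false, 0) := by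
        unfold pvStepA; simp [hd]
      rw [List.foldl_cons, hstep, ih]
      unfold pvR
      rw [List.findIdx?_cons]
      have hb : (PySem.Str.strip l == "-") = false := by simp [hd]
      rw [hb]
      simp only [Bool.false_eq_true, if_false]
      cases h : ls.findIdx? (fun l => PySem.Str.strip l == "-") with
      | none => simp
      | some i => simp

-- B's backward fold maintains (suffix command count, pvR of the suffix)
theorem pvFold_B (ls : List String) :
    ls.reverse.foldl pvStepB (0, 0) = (((ls.countP pvAltPred : Nat) : Int), pvR ls) := by
  induction ls with
  | nil => simp [pvR]
  | cons l ls ih =>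
    rw [List.reverse_cons, List.foldl_append, ih, List.foldl_cons, List.foldl_nil]
    unfold pvStepB
    by_cases hd : PySem.Str.strip l = "-"
    · have hp := pvPred_divider l hd
      have hcnt : (l :: ls).countP pvAltPred = ls.countP pvAltPred := by
        rw [List.countP_cons]; simp [hp]
      have hr : pvR (l :: ls) = ((ls.countP pvAltPred : Nat) : Int) := by
        unfold pvR
        rw [List.findIdx?_cons]
        simp [hd]
      simp [hd, hcnt, hr]
    · have hb : (PySem.Str.strip l == "-") = false := by simp [hd]
      have hr : pvR (l :: ls) = pvR ls := by
        unfold pvR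
        rw [List.findIdx?_cons, hb]
        simp only [Bool.false_eq_true, if_false]
        cases h : ls.findIdx? (fun l => PySem.Str.strip l == "-") with
        | none => simp
        | some i => simp
      by_cases hp : pvAltPred l
      · have hcnt : (l :: ls).countP pvAltPred = ls.countP pvAltPred + 1 := by
          rw [List.countP_cons]; simp [hp]
        simp [hb, hp, hcnt, hr]
      · have hcnt : (l :: ls).countP pvAltPred = ls.countP pvAltPred := by
          rw [List.countP_cons]; simp [hp]
        simp [hb, hp, hcnt, hr]

-- ===== VERDICT (by name: the statement is the Claim_ definition above) =====
theorem count_command_lines_py_spec : Claim_equal_count_command_lines_py := by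
  intro t _
  unfold Spec_count_command_lines_py count_command_lines_py count_command_lines_py_alt
  rw [pvFold_A, pvFold_B]
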